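-- pv_equiv track=rewrite | github.com/nullvalues/anchor | skills/pairmode/scripts/sync.py | _split_by_h2
-- ===== SOURCE A (Python) =====
-- def _split_by_h2(text: str) -> list[tuple[str, str]]:
--     """Split text into (header_line, section_body) pairs.
--
--     The first tuple's header_line may be empty (preamble content).
--     Each section_body does NOT include the trailing newline before the next header.
--     """
--     lines = text.splitlines(keepends=True)
--     parts: list[tuple[str, str]] = []
--     current_header = ""
--     current_body_lines: list[str] = []
--
--     for line in lines:
--         if line.startswith("## "):
--             # Flush previous section
--             parts.append((current_header, "".join(current_body_lines)))
--             current_header = line.rstrip("\n")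
--             current_body_lines = []
--         else:
--             current_body_lines.append(line)
--
--     # Flush final section
--     parts.append((current_header, "".join(current_body_lines)))
--     return parts
-- ===== SOURCE B (Python) =====
-- def _split_by_h2(text: str) -> list[tuple[str, str]]:
--     """Peel-off decomposition: repeatedly cut the line list at the next
--     '## ' header instead of flushing an accumulator line by line."""
--     lines = text.splitlines(keepends=True)
--
--     def split_at_header(ls):
--         j = 0
--         while j < len(ls) and not ls[j].startswith("## "):
--             j += 1
--         return "".join(ls[:j]), ls[j:]
--
--     pre, rest = split_at_header(lines)
--     parts = [("", pre)]
--     while rest: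
--         body, new_rest = split_at_header(rest[1:])
--         parts.append((rest[0].rstrip("\n"), body))
--         rest = new_rest
--     return parts
-- ===== Notes on version B (the rewrite author's own statement) =====
-- stated objective: alternative
-- what changed: Replaces A's single fold with flush-as-you-go accumulators (current header, current body lines) by a peel-off decomposition: a split-at-next-header helper cuts the line list into segments and sections are emitted one whole segment at a time.
import Mathlib
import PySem

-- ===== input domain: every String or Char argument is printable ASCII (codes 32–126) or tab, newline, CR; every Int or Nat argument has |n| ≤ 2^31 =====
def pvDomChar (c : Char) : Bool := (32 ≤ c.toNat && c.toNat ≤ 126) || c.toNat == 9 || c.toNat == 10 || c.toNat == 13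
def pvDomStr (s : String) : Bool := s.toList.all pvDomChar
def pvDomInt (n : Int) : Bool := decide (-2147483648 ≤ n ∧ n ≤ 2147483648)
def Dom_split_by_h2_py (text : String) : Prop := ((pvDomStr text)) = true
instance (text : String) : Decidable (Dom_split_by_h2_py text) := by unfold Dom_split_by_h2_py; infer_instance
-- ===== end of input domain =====

-- B replaces A's flush-as-you-go accumulator fold by a peel-at-next-header
-- decomposition (same cost); return values proved equal on all inputs.

-- shared helper: Python str.splitlines(keepends=True); exact on the Dom charset,
-- where the only line breaks are '\n', '\r' and '\r\n' (PySem.Str.splitlines drops ends)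
def pvSplitKeepGo (cur : List Char) : List Char → List (List Char)
  | [] => if cur = [] then [] else [cur.reverse]
  | '\r' :: '\n' :: rest => (cur.reverse ++ ['\r', '\n']) :: pvSplitKeepGo [] rest
  | '\n' :: rest => (cur.reverse ++ ['\n']) :: pvSplitKeepGo [] rest
  | '\r' :: rest => (cur.reverse ++ ['\r']) :: pvSplitKeepGo [] rest
  | c :: rest => pvSplitKeepGo (c :: cur) rest

def pvSplitKeep (s : List Char) : List (List Char) := pvSplitKeepGo [] s

-- shared helper: line.rstrip("\n")
def pvRstripNl (l : List Char) : List Char := (l.reverse.dropWhile (· == '\n')).reverse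

-- ===== PORT A =====
-- the for loop over lines with state (parts, current_header, current_body_lines);
-- the [] case is the final flush; "".join = flatten
def pvALoop (parts : List (String × String)) (hdr : List Char) (body : List (List Char)) :
    List (List Char) → List (String × String)
  | [] => parts ++ [(String.mk hdr, String.mk body.flatten)]
  | line :: rest =>
    if PySem.Chars.startswith line ['#', '#', ' '] then
      pvALoop (parts ++ [(String.mk hdr, String.mk body.flatten)]) (pvRstripNl line) [] rest
    else
      pvALoop parts hdr (body ++ [line]) rest

def split_by_h2_py (text : String) : List (String × String) :=
  pvALoop [] [] [] (pvSplitKeep text.toList)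

-- ===== PORT B =====
-- not a header line
def pvNotH (l : List Char) : Bool := !(PySem.Chars.startswith l ['#', '#', ' '])

-- Source B's while loop: peel header, cut the tail at the next header, recurse on the rest
def pvBGo : List (List Char) → List (String × String)
  | [] => []
  | h :: t =>
    (String.mk (pvRstripNl h), String.mk (t.takeWhile pvNotH).flatten) :: pvBGo (t.dropWhile pvNotH)
termination_by ls => ls.length
decreasing_by
  exact Nat.lt_succ_of_le (List.length_dropWhile_le _ _)

def split_by_h2_py_alt (text : String) : List (String × String) :=
  let lines := pvSplitKeep text.toList
  ("", String.mk (lines.takeWhile pvNotH).flatten) :: pvBGo (lines.dropWhile pvNotH)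

-- ===== PRECONDITION & SPEC =====
def Spec_split_by_h2_py (text : String) (out : List (String × String)) : Prop := out = split_by_h2_py_alt text
instance (text : String) (out : List (String × String)) : Decidable (Spec_split_by_h2_py text out) := by unfold Spec_split_by_h2_py; infer_instance

-- ===== CLAIM (what is proved, stated in full; the proofs are below) =====
def Claim_equal_split_by_h2_py : Prop := ∀ (text : String), Dom_split_by_h2_py text → Spec_split_by_h2_py text (split_by_h2_py text)

-- ===== LEMMAS AND PROOFS =====

-- loop invariant: A's fold equals parts ++ the peeled sections of the remaining lines
theorem pvALoop_eq (ls : List (List Char)) :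
    ∀ (parts : List (String × String)) (hdr : List Char) (body : List (List Char)),
    pvALoop parts hdr body ls =
      parts ++ (String.mk hdr, String.mk (body ++ ls.takeWhile pvNotH).flatten) ::
        pvBGo (ls.dropWhile pvNotH) := by
  induction ls with
  | nil => intro parts hdr body; simp [pvALoop, pvBGo]
  | cons line rest ih =>
    intro parts hdr body
    by_cases h : PySem.Chars.startswith line ['#', '#', ' '] = true
    · rw [pvALoop, if_pos h, ih]
      simp [pvNotH, h, pvBGo]
    · rw [pvALoop, if_neg h, ih]
      simp [pvNotH, eq_false_of_ne_true h, List.append_assoc]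

-- ===== VERDICT (by name: the statement is the Claim_ definition above) =====
theorem split_by_h2_py_spec : Claim_equal_split_by_h2_py := by
  intro text _
  unfold Spec_split_by_h2_py split_by_h2_py split_by_h2_py_alt
  rw [pvALoop_eq]
  rfl
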